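-- pv_equiv track=rewrite | github.com/tushariccs/PWSkillsDataScience | PW PPT Preparation/29.06.2023/Q5.py | staircase
-- ===== SOURCE A (Python) =====
-- def staircase(n:int)->int:
--     i = 1
--     res = 0
--     while(n>=i):
--         n-=i
--         res+=1
--         i+=1
--     return res
-- ===== SOURCE B (Python) =====
-- def staircase(n: int) -> int:
--     # binary search for the largest k with k*(k+1)//2 <= n
--     if n <= 0:
--         return 0
--     lo, hi = 0, n
--     while lo < hi:
--         mid = (lo + hi + 1) // 2
--         if mid * (mid + 1) // 2 <= n:
--             lo = mid
--         else:
--             hi = mid - 1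
--     return lo
-- ===== Notes on version B (the rewrite author's own statement) =====
-- stated objective: faster
-- what changed: Replaced the linear step-subtracting while-loop with a binary search on k for the largest k with k(k+1)/2 <= n.
import Mathlib
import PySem

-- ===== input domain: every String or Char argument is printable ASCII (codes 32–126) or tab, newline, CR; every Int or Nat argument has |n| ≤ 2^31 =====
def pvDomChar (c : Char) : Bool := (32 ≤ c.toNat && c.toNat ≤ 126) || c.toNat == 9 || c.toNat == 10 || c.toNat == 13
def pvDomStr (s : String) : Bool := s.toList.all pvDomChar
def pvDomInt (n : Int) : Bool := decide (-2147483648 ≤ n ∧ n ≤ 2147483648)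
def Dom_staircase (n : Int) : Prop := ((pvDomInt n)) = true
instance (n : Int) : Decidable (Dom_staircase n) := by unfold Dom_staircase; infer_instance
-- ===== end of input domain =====

-- B replaces A's linear step-subtracting loop with a binary search for the largest k with k(k+1)/2 ≤ n.

-- ===== PORT A =====
-- A's while loop as fuel recursion; fuel n.toNat+1 is enough since n shrinks by i ≥ 1 each pass.
def staircaseLoop : Nat → Int → Int → Int → Int
  | 0, _, _, res => res
  | fuel + 1, n, i, res =>
    if i ≤ n then staircaseLoop fuel (n - i) (i + 1) (res + 1) else res

def staircase (n : Int) : Int := staircaseLoop (n.toNat + 1) n 1 0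

-- ===== PORT B =====
-- B's binary-search loop; hi - lo shrinks each pass, so fuel n.toNat+1 is enough.
def staircaseAltLoop : Nat → Int → Int → Int → Int
  | 0, _, lo, _ => lo
  | fuel + 1, n, lo, hi =>
    if lo < hi then
      let mid := PySem.Int.floordiv (lo + hi + 1) 2
      if PySem.Int.floordiv (mid * (mid + 1)) 2 ≤ n then staircaseAltLoop fuel n mid hi
      else staircaseAltLoop fuel n lo (mid - 1)
    else lo

def staircase_alt (n : Int) : Int :=
  if n ≤ 0 then 0 else staircaseAltLoop (n.toNat + 1) n 0 n

-- ===== PRECONDITION & SPEC =====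
def Spec_staircase (n : Int) (out : Int) : Prop := out = staircase_alt n
instance (n : Int) (out : Int) : Decidable (Spec_staircase n out) := by unfold Spec_staircase; infer_instance

-- ===== CLAIM (what is proved, stated in full; the proofs are below) =====
def Claim_equal_staircase : Prop := ∀ (n : Int), Dom_staircase n → Spec_staircase n (staircase n)

-- ===== LEMMAS AND PROOFS =====

-- A's loop returns res + k for the unique k with Σ_{j=0}^{k-1}(i+j) ≤ n < Σ_{j=0}^{k}(i+j) (stated ×2).
theorem staircaseLoop_eq (fuel : Nat) :
    ∀ (n i res k : Int), n.toNat < fuel → 1 ≤ i → 0 ≤ k →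
      k * (2 * i + k - 1) ≤ 2 * n → 2 * n < (k + 1) * (2 * i + k) →
      staircaseLoop fuel n i res = res + k := by
  induction fuel with
  | zero => intro n i res k h; omega
  | succ m ih =>
    intro n i res k hf hi hk hlow hhigh
    by_cases hni : i ≤ n
    · have hk1 : 1 ≤ k := by nlinarith
      have := ih (n - i) (i + 1) (res + 1) (k - 1) (by omega) (by omega) (by omega)
        (by nlinarith) (by nlinarith)
      simp only [staircaseLoop, if_pos hni, this]; ring
    · have hk0 : k = 0 := by nlinarith
      simp only [staircaseLoop, if_neg hni, hk0, add_zero]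

-- B's loop returns some k with k(k+1) ≤ 2n < (k+1)(k+2), given the invariants.
theorem staircaseAltLoop_bounds (fuel : Nat) :
    ∀ (n lo hi : Int), (hi - lo).toNat < fuel → 0 ≤ lo → lo ≤ hi →
      lo * (lo + 1) ≤ 2 * n → 2 * n < (hi + 1) * (hi + 2) →
      0 ≤ staircaseAltLoop fuel n lo hi ∧
      staircaseAltLoop fuel n lo hi * (staircaseAltLoop fuel n lo hi + 1) ≤ 2 * n ∧
      2 * n < (staircaseAltLoop fuel n lo hi + 1) * (staircaseAltLoop fuel n lo hi + 2) := by
  induction fuel with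
  | zero => intro n lo hi h; omega
  | succ m ih =>
    intro n lo hi hf h0 hle hlow hhigh
    by_cases hlt : lo < hi
    · simp only [staircaseAltLoop, if_pos hlt,
        PySem.Int.floordiv_eq_ediv_of_pos (by omega : (0:Int) < 2)]
      set mid := (lo + hi + 1) / 2 with hmiddef
      have hb : lo < mid ∧ mid ≤ hi := by omega
      obtain ⟨t, ht⟩ := Int.even_mul_succ_self mid
      have ht2 : mid * (mid + 1) = 2 * t := by omega
      have hcond : mid * (mid + 1) / 2 ≤ n ↔ mid * (mid + 1) ≤ 2 * n := by
        rw [ht2, Int.mul_ediv_cancel_left _ (by norm_num : (2:Int) ≠ 0)]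
        omega
      by_cases hc : mid * (mid + 1) / 2 ≤ n
      · rw [if_pos hc]
        exact ih n mid hi (by omega) (by omega) (by omega) (hcond.mp hc) hhigh
      · rw [if_neg hc]
        have hub : 2 * n < ((mid - 1) + 1) * ((mid - 1) + 2) := by
          have := not_le.mp (fun h => hc (hcond.mpr h))
          nlinarith [this]
        exact ih n lo (mid - 1) (by omega) h0 (by omega) hlow hub
    · have hlohi : lo = hi := by omega
      simp only [staircaseAltLoop, if_neg hlt]
      refine ⟨h0, hlow, ?_⟩
      rw [hlohi]; linarith
-- ===== VERDICT (by name: the statement is the Claim_ definition above) =====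
theorem staircase_spec : Claim_equal_staircase := by
  intro n _
  unfold Spec_staircase
  by_cases hn : n ≤ 0
  · have hA : staircase n = 0 := by
      unfold staircase
      have : n.toNat = 0 := by omega
      rw [this]
      simp only [staircaseLoop, if_neg (by omega : ¬ (1:Int) ≤ n)]
    rw [hA, staircase_alt, if_pos hn]
  · push Not at hn
    have halt : staircase_alt n = staircaseAltLoop (n.toNat + 1) n 0 n := by
      rw [staircase_alt, if_neg (by omega)]
    obtain ⟨hk0, hklow, hkhigh⟩ :=
      staircaseAltLoop_bounds (n.toNat + 1) n 0 n (by omega) (by omega) (by omega)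
        (by omega) (by nlinarith)
    rw [halt]
    set k := staircaseAltLoop (n.toNat + 1) n 0 n
    have := staircaseLoop_eq (n.toNat + 1) n 1 0 k (by omega) (by omega) hk0
      (by nlinarith) (by nlinarith)
    unfold staircase
    omega
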